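-- pv_equiv track=rewrite | github.com/todayis-sunny/Algorithm | 프로그래머스/1/389478. 택배 상자 꺼내기/택배 상자 꺼내기.py | solution
-- ===== SOURCE A (Python) =====
-- def solution(n, w, num):
--     boxs = [[] for _ in range(w)]
--     box_num = 0
--     direction = 1  # 1이면 오른쪽, -1이면 왼쪽
--
--     while box_num < n:
--         for idx in range(0, w, direction) if direction == 1 else range(w - 1, -1, -1):
--             box_num += 1
--             boxs[idx].append(box_num)
--             if box_num == n:
--                 break
--         direction *= -1  # 방향 전환
--
--     for values in boxs:
--         if num in values:
--             return len(values) - values.index(num)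
--
--     return 0
-- ===== SOURCE B (Python) =====
-- def solution(n, w, num):
--     # O(1) arithmetic: locate num's row/column in the zigzag stacking and
--     # compute the column height directly.
--     if num < 1 or n < num:
--         return 0
--     r, p = divmod(num - 1, w)
--     col = p if r % 2 == 0 else w - 1 - p
--     R = (n - 1) // w              # index of the top (possibly partial) row
--     last = (n - 1) % w + 1        # number of boxes in the top row
--     in_last = (col < last) if R % 2 == 0 else (col >= w - last)
--     return R + (1 if in_last else 0) - r
-- ===== Notes on version B (the rewrite author's own statement) =====
-- stated objective: faster
-- what changed: B replaces A's full zigzag simulation (building w stacks box by box, then scanning them with 'in'/'index') by closed-form division/parity arithmetic that locates num's row and column and the column height directly.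
import Mathlib
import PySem

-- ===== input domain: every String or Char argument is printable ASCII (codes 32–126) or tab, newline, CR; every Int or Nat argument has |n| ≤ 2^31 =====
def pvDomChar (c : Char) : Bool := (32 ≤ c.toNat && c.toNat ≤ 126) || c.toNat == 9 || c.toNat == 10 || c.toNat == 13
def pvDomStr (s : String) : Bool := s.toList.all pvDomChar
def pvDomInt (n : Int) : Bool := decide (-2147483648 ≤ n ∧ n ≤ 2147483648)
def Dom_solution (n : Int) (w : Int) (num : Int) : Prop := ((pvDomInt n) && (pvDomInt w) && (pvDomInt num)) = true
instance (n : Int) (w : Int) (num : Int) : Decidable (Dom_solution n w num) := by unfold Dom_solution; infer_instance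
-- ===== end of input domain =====

-- B replaces A's zigzag simulation by O(1) row/column arithmetic; equivalence is
-- proved on Pre_ (A loops forever when w ≤ 0 < n, those inputs are excluded).

-- ===== PORT A =====

-- inner 'for idx in …: box_num += 1; boxs[idx].append(box_num); if box_num == n: break'
-- (indices produced by the ranges are 0 … w-1, hence nonnegative, so .toNat is exact here)
def pvInner (n : Int) : List Int → List (List Int) → Int → (List (List Int) × Int)
  | [], boxs, b => (boxs, b)
  | idx :: rest, boxs, b =>
    let b' := b + 1
    let boxs' := boxs.modify idx.toNat (fun l => l ++ [b'])
    if b' == n then (boxs', b') else pvInner n rest boxs' b'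

-- 'while box_num < n: …'; fuel n.toNat + 1 suffices because each pass adds ≥ 1 box when w ≥ 1
-- (for w ≤ 0 < n the Python loops forever; those inputs are outside Pre_solution)
def pvWhile (n w : Int) : Nat → List (List Int) → Int → Int → List (List Int)
  | 0, boxs, _, _ => boxs
  | fuel + 1, boxs, b, d =>
    if b < n then
      let idxs := if d == 1 then PySem.List.pyRange 0 w 1 else PySem.List.pyRange (w - 1) (-1) (-1)
      let r := pvInner n idxs boxs b
      pvWhile n w fuel r.1 r.2 (d * -1)
    else boxs

-- 'for values in boxs: if num in values: return len(values) - values.index(num)'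
def pvScan (num : Int) : List (List Int) → Int
  | [] => 0
  | values :: rest =>
    if values.contains num then
      match PySem.List.index? values num with
      | some i => (values.length : Int) - (i : Int)
      | none => 0  -- unreachable: contains num holds
    else pvScan num rest

def solution (n : Int) (w : Int) (num : Int) : Int :=
  pvScan num (pvWhile n w (n.toNat + 1) (List.replicate w.toNat []) 0 1)

-- ===== PORT B =====
def solution_alt (n : Int) (w : Int) (num : Int) : Int :=
  if num < 1 || n < num then 0
  else
    let r := PySem.Int.floordiv (num - 1) w
    let p := PySem.Int.mod (num - 1) w
    let col := if PySem.Int.mod r 2 == 0 then p else w - 1 - p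
    let R := PySem.Int.floordiv (n - 1) w
    let last := PySem.Int.mod (n - 1) w + 1
    let inLast := if PySem.Int.mod R 2 == 0 then decide (col < last) else decide (col ≥ w - last)
    R + (if inLast then 1 else 0) - r

-- ===== PRECONDITION & SPEC =====
-- Pre_ excludes exactly w ≤ 0 with n ≥ 1, where A's while loop never terminates.
def Pre_solution (n : Int) (w : Int) (num : Int) : Prop := 1 ≤ w ∨ n ≤ 0
instance (n : Int) (w : Int) (num : Int) : Decidable (Pre_solution n w num) := by
  unfold Pre_solution; infer_instance

def pvWitness_solution : Int × Int × Int := (5, 3, 4)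

def Spec_solution (n : Int) (w : Int) (num : Int) (out : Int) : Prop := out = solution_alt n w num
instance (n : Int) (w : Int) (num : Int) (out : Int) : Decidable (Spec_solution n w num out) := by
  unfold Spec_solution; infer_instance

-- ===== CLAIM (what is proved, stated in full; the proofs are below) =====
def Claim_equal_solution : Prop := ∀ (n : Int) (w : Int) (num : Int), Dom_solution n w num → Pre_solution n w num → Spec_solution n w num (solution n w num)

-- ===== LEMMAS AND PROOFS =====

-- value stacked at row k, column c (0-based), rows alternating direction
def vrow (w : Int) (k : Nat) (c : Nat) : Int :=
  (k : Int) * w + (if k % 2 = 0 then (c : Int) + 1 else w - (c : Int))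

-- column c after the first k (complete) rows
def pcols (w : Int) (k : Nat) (c : Nat) : List Int :=
  (List.range k).map (fun j => vrow w j c)

-- final contents of column c
def fcol (n w : Int) (c : Nat) : List Int :=
  ((List.range n.toNat).map (fun j => vrow w j c)).filter (fun v => decide (v ≤ n))

lemma vrow_bounds (w : Int) (hw : 0 < w) (k c : Nat) (hc : (c : Int) < w) :
    (k : Int) * w + 1 ≤ vrow w k c ∧ vrow w k c ≤ (k : Int) * w + w := by
  unfold vrow
  have : (0 : Int) ≤ (c : Int) := Int.natCast_nonneg c
  split <;> omega

lemma map_range_modify (W : Nat) (f : Nat → List Int) (a : Nat) (g : List Int → List Int)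
    (ha : a < W) :
    ((List.range W).map f).modify a g = (List.range W).map (fun c => if c = a then g (f c) else f c) := by
  apply List.ext_getElem
  · simp
  · intro i h1 h2
    simp only [List.getElem_modify, List.getElem_map, List.getElem_range]
    simp only [List.length_modify, List.length_map, List.length_range] at h1
    by_cases h : a = i <;> simp [h]
    · intro h'; exact absurd h'.symm h

lemma inner_asc (n w : Int) (hw : 0 < w) :
    ∀ (m a : Nat) (colf : Nat → List Int) (b : Int), b < n → a + m = w.toNat →
    pvInner n ((List.range' a m).map (fun (j : Nat) => (j : Int))) ((List.range w.toNat).map colf) b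
    = ((List.range w.toNat).map (fun c =>
        if a ≤ c ∧ b + (c : Int) - (a : Int) + 1 ≤ n then colf c ++ [b + (c : Int) - (a : Int) + 1] else colf c),
       b + min (m : Int) (n - b)) := by
  intro m
  induction m with
  | zero =>
    intro a colf b hb ha
    simp only [List.range'_zero, List.map_nil, pvInner]
    refine Prod.ext ?_ ?_
    · apply List.map_congr_left
      intro c hc
      rw [List.mem_range] at hc
      rw [if_neg]
      rintro ⟨h1, _⟩
      omega
    · omega
  | succ m ih =>
    intro a colf b hb ha
    have haW : a < w.toNat := by omega
    rw [List.range'_succ, List.map_cons]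
    simp only [pvInner, Int.toNat_natCast]
    rw [map_range_modify _ _ _ _ haW]
    by_cases hn : b + 1 = n
    · rw [if_pos (by simpa using hn)]
      refine Prod.ext ?_ ?_
      · apply List.map_congr_left
        intro c hc
        rw [List.mem_range] at hc
        by_cases hca : c = a
        · subst hca
          rw [if_pos rfl, if_pos ⟨le_refl _, by omega⟩]
          have : b + (c : Int) - (c : Int) + 1 = b + 1 := by ring
          rw [this]
        · rw [if_neg hca, if_neg]
          rintro ⟨h1, h2⟩
          have : (c : Int) ≤ (a : Int) := by omega
          exact hca (by omega)
      · omega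
    · rw [if_neg (by simpa using hn)]
      have hb' : b + 1 < n := by omega
      rw [ih (a + 1) _ (b + 1) hb' (by omega)]
      refine Prod.ext ?_ ?_
      · apply List.map_congr_left
        intro c hc
        rw [List.mem_range] at hc
        by_cases hca : c = a
        · subst hca
          rw [if_neg (by omega), if_pos rfl, if_pos ⟨le_refl _, by omega⟩]
          have : b + (c : Int) - (c : Int) + 1 = b + 1 := by ring
          rw [this]
        · rw [if_neg hca]
          by_cases hcond : a ≤ c ∧ b + (c : Int) - (a : Int) + 1 ≤ n
          · rw [if_pos (⟨by omega, by push_cast; omega⟩ : a + 1 ≤ c ∧ b + 1 + (c : Int) - ((a + 1 : Nat) : Int) + 1 ≤ n), if_pos hcond]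
            congr 2
            push_cast
            ring
          · rw [if_neg, if_neg hcond]
            rintro ⟨h1, h2⟩
            apply hcond
            constructor
            · omega
            · push_cast at h2 ⊢; omega
      · omega

lemma inner_desc (n w : Int) (hw : 0 < w) :
    ∀ (m : Nat) (colf : Nat → List Int) (b : Int), b < n → m ≤ w.toNat →
    pvInner n ((List.range m).map (fun (k : Nat) => (m : Int) - 1 - (k : Int))) ((List.range w.toNat).map colf) b
    = ((List.range w.toNat).map (fun c =>
        if c < m ∧ b + (m : Int) - (c : Int) ≤ n then colf c ++ [b + (m : Int) - (c : Int)] else colf c),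
       b + min (m : Int) (n - b)) := by
  intro m
  induction m with
  | zero =>
    intro colf b hb hm
    simp only [List.range_zero, List.map_nil, pvInner]
    refine Prod.ext ?_ ?_
    · apply List.map_congr_left
      intro c hc
      rw [if_neg]
      rintro ⟨h1, _⟩
      omega
    · omega
  | succ m ih =>
    intro colf b hb hm
    have hdl : (List.range (m + 1)).map (fun (k : Nat) => ((m + 1 : Nat) : Int) - 1 - (k : Int))
        = (m : Int) :: (List.range m).map (fun (k : Nat) => (m : Int) - 1 - (k : Int)) := by
      rw [List.range_succ_eq_map, List.map_cons, List.map_map]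
      congr 1
      · push_cast; ring
      · apply List.map_congr_left
        intro k hk
        simp only [Function.comp_apply]
        push_cast; ring
    rw [hdl]
    have hmW : m < w.toNat := by omega
    simp only [pvInner, Int.toNat_natCast]
    rw [map_range_modify _ _ _ _ hmW]
    by_cases hn : b + 1 = n
    · rw [if_pos (by simpa using hn)]
      refine Prod.ext ?_ ?_
      · apply List.map_congr_left
        intro c hc
        rw [List.mem_range] at hc
        by_cases hcm : c = m
        · subst hcm
          rw [if_pos rfl, if_pos ⟨by omega, by push_cast; omega⟩]
          have : b + ((c : Int) + 1) - (c : Int) = b + 1 := by ring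
          push_cast
          rw [this]
        · rw [if_neg hcm, if_neg]
          rintro ⟨h1, h2⟩
          push_cast at h2
          exact hcm (by omega)
      · omega
    · rw [if_neg (by simpa using hn)]
      have hb' : b + 1 < n := by omega
      rw [ih _ (b + 1) hb' (by omega)]
      refine Prod.ext ?_ ?_
      · apply List.map_congr_left
        intro c hc
        rw [List.mem_range] at hc
        by_cases hcm : c = m
        · subst hcm
          rw [if_neg (by omega), if_pos rfl, if_pos ⟨by omega, by push_cast; omega⟩]
          have : b + ((c : Int) + 1) - (c : Int) = b + 1 := by ring
          push_cast
          rw [this]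
        · by_cases hcond : c < m ∧ b + 1 + (m : Int) - (c : Int) ≤ n
          · rw [if_pos hcond, if_neg hcm, if_pos ⟨by omega, by push_cast; omega⟩]
            congr 2
            push_cast
            ring
          · rw [if_neg hcond, if_neg hcm, if_neg]
            rintro ⟨h1, h2⟩
            apply hcond
            refine ⟨by omega, by push_cast at h2 ⊢; omega⟩
      · omega

lemma pvWhile_done (n w : Int) (f : Nat) (boxs : List (List Int)) (d : Int) :
    pvWhile n w f boxs n d = boxs := by
  cases f <;> simp [pvWhile]

lemma fcol_eq (n w : Int) (hw : 0 < w) (k : Nat) (c : Nat) (hc : (c : Int) < w)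
    (h1 : (k : Int) * w < n) (h2 : n ≤ ((k : Int) + 1) * w) :
    fcol n w c = pcols w k c ++ (if vrow w k c ≤ n then [vrow w k c] else []) := by
  have hkw : (k : Int) * 1 ≤ (k : Int) * w :=
    mul_le_mul_of_nonneg_left (by omega) (Int.natCast_nonneg k)
  have hk1 : k + 1 ≤ n.toNat := by omega
  have hsplit : n.toNat = (k + 1) + (n.toNat - (k + 1)) := by omega
  unfold fcol
  rw [hsplit, List.range_add, List.map_append, List.filter_append, List.range_succ,
    List.map_append, List.filter_append]
  have hpref : ((List.range k).map (fun j => vrow w j c)).filter (fun v => decide (v ≤ n))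
      = pcols w k c := by
    unfold pcols
    rw [List.filter_eq_self]
    intro x hx
    rw [List.mem_map] at hx
    obtain ⟨j, hj, rfl⟩ := hx
    rw [List.mem_range] at hj
    have hb := vrow_bounds w hw j c hc
    have hj1 : ((j : Int) + 1) * w ≤ (k : Int) * w :=
      mul_le_mul_of_nonneg_right (by push_cast; omega) (by omega)
    simp
    push_cast at hj1
    have hjw : ((j : Int) + 1) * w = (j : Int) * w + w := by ring
    omega
  have htail : (((List.range (n.toNat - (k + 1))).map (fun x => k + 1 + x)).map
      (fun j => vrow w j c)).filter (fun v => decide (v ≤ n)) = [] := by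
    rw [List.filter_eq_nil_iff]
    intro x hx
    rw [List.map_map, List.mem_map] at hx
    obtain ⟨t, ht, rfl⟩ := hx
    simp only [Function.comp_apply]
    have hb := vrow_bounds w hw (k + 1 + t) c hc
    have hj1 : ((k : Int) + 1) * w ≤ ((k : Int) + 1 + (t : Int)) * w :=
      mul_le_mul_of_nonneg_right (by omega) (by omega)
    simp only [decide_eq_true_eq, not_le]
    push_cast at hb
    omega
  rw [hpref, htail, List.append_nil]
  congr 1
  by_cases hv : vrow w k c ≤ n <;> simp [hv]

lemma pass_eq (n w : Int) (hw : 0 < w) (k : Nat) (hb : (k : Int) * w < n) :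
    pvInner n (if (if k % 2 = 0 then (1 : Int) else -1) == 1 then PySem.List.pyRange 0 w 1
               else PySem.List.pyRange (w - 1) (-1) (-1))
      ((List.range w.toNat).map (pcols w k)) ((k : Int) * w)
    = ((List.range w.toNat).map
        (fun c => pcols w k c ++ (if vrow w k c ≤ n then [vrow w k c] else [])),
       (k : Int) * w + min w (n - (k : Int) * w)) := by
  have hWw : (w.toNat : Int) = w := Int.toNat_of_nonneg (by omega)
  by_cases hk2 : k % 2 = 0
  · rw [if_pos hk2]
    have h1 : ((1 : Int) == 1) = true := by simp
    rw [h1, if_pos rfl]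
    have hr : PySem.List.pyRange 0 w 1 = (List.range' 0 w.toNat).map (fun (j : Nat) => (j : Int)) := by
      rw [PySem.List.pyRange_one, ← List.range_eq_range']
      simp
    rw [hr, inner_asc n w hw w.toNat 0 _ _ hb (by omega)]
    refine Prod.ext ?_ ?_
    · apply List.map_congr_left
      intro d hd
      rw [List.mem_range] at hd
      have hdw : (d : Int) < w := by omega
      have hval : (k : Int) * w + (d : Int) - ((0 : Nat) : Int) + 1 = vrow w k d := by
        unfold vrow; rw [if_pos hk2]; push_cast; ring
      by_cases hv : vrow w k d ≤ n
      · rw [if_pos ⟨by omega, by rw [hval]; exact hv⟩, if_pos hv, hval]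
      · rw [if_neg, if_neg hv, List.append_nil]
        rintro ⟨_, hle⟩
        rw [hval] at hle
        exact hv hle
    · simp only
      omega
  · rw [if_neg hk2]
    have h1 : ((-1 : Int) == 1) = false := by simp
    rw [h1]
    simp only [Bool.false_eq_true, if_false]
    have hr : PySem.List.pyRange (w - 1) (-1) (-1)
        = (List.range w.toNat).map (fun (j : Nat) => (w.toNat : Int) - 1 - (j : Int)) := by
      rw [PySem.List.pyRange_neg_one]
      have : (w - 1 - (-1)).toNat = w.toNat := by omega
      rw [this]
      apply List.map_congr_left
      intro j hj
      omega
    rw [hr, inner_desc n w hw w.toNat _ _ hb (le_refl _)]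
    refine Prod.ext ?_ ?_
    · apply List.map_congr_left
      intro d hd
      rw [List.mem_range] at hd
      have hdw : (d : Int) < w := by omega
      have hval : (k : Int) * w + (w.toNat : Int) - (d : Int) = vrow w k d := by
        unfold vrow; rw [if_neg hk2]; omega
      by_cases hv : vrow w k d ≤ n
      · rw [if_pos ⟨hd, by rw [hval]; exact hv⟩, if_pos hv, hval]
      · rw [if_neg, if_neg hv, List.append_nil]
        rintro ⟨_, hle⟩
        rw [hval] at hle
        exact hv hle
    · simp only
      omega

lemma while_spec (n w : Int) (hw : 0 < w) :
    ∀ (fuel k : Nat), (k : Int) * w < n → n.toNat ≤ k + fuel →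
    pvWhile n w fuel ((List.range w.toNat).map (pcols w k)) ((k : Int) * w)
      (if k % 2 = 0 then 1 else -1)
    = (List.range w.toNat).map (fcol n w) := by
  intro fuel
  induction fuel with
  | zero =>
    intro k h1 h2
    have hkw : (k : Int) * 1 ≤ (k : Int) * w :=
      mul_le_mul_of_nonneg_left (by omega) (Int.natCast_nonneg k)
    omega
  | succ fuel ih =>
    intro k h1 h2
    simp only [pvWhile, if_pos h1]
    rw [pass_eq n w hw k h1]
    by_cases hcase : ((k : Int) + 1) * w < n
    · have hmin : min w (n - (k : Int) * w) = w := by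
        have : ((k : Int) + 1) * w = (k : Int) * w + w := by ring
        omega
      have hb' : (k : Int) * w + min w (n - (k : Int) * w) = ((k + 1 : Nat) : Int) * w := by
        rw [hmin]; push_cast; ring
      have hboxs : (List.range w.toNat).map
          (fun c => pcols w k c ++ (if vrow w k c ≤ n then [vrow w k c] else []))
          = (List.range w.toNat).map (pcols w (k + 1)) := by
        apply List.map_congr_left
        intro d hd
        rw [List.mem_range] at hd
        have hdw : (d : Int) < w := by omega
        have hb := vrow_bounds w hw k d hdw
        have : vrow w k d ≤ n := by
          have : ((k : Int) + 1) * w = (k : Int) * w + w := by ring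
          omega
        rw [if_pos this]
        unfold pcols
        rw [List.range_succ, List.map_append, List.map_singleton]
      rw [hb', hboxs]
      have hd' : (if k % 2 = 0 then (1 : Int) else -1) * -1
          = (if (k + 1) % 2 = 0 then (1 : Int) else -1) := by
        by_cases hp : k % 2 = 0
        · rw [if_pos hp, if_neg (by omega)]; ring
        · rw [if_neg hp, if_pos (by omega)]; ring
      rw [hd']
      exact ih (k + 1) hcase (by omega)
    · have hmin : min w (n - (k : Int) * w) = n - (k : Int) * w := by
        have : ((k : Int) + 1) * w = (k : Int) * w + w := by ring
        omega
      have hb' : (k : Int) * w + min w (n - (k : Int) * w) = n := by rw [hmin]; ring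
      rw [hb', pvWhile_done]
      apply List.map_congr_left
      intro d hd
      rw [List.mem_range] at hd
      have hdw : (d : Int) < w := by omega
      rw [fcol_eq n w hw k d hdw h1 (by omega)]

lemma pvScan_skip (num : Int) (L rest : List (List Int)) (h : ∀ l ∈ L, num ∉ l) :
    pvScan num (L ++ rest) = pvScan num rest := by
  induction L with
  | nil => rfl
  | cons x xs ih =>
    have hx : num ∉ x := h x (by simp)
    have : x.contains num = false := by
      simpa using hx
    simp only [List.cons_append, pvScan, this, Bool.false_eq_true, if_false]
    exact ih (fun l hl => h l (by simp [hl]))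

lemma index?_append_cons (l rest : List Int) (x : Int) (h : x ∉ l) :
    PySem.List.index? (l ++ x :: rest) x = some l.length := by
  induction l with
  | nil => exact PySem.List.index?_cons_self x rest
  | cons y ys ih =>
    have hy : y ≠ x := by intro he; exact h (by simp [he])
    rw [List.cons_append, PySem.List.index?_cons_of_ne _ hy,
      ih (fun hm => h (by simp [hm]))]
    rfl

lemma mem_fcol (n w : Int) (c : Nat) (x : Int) (hx : x ∈ fcol n w c) :
    ∃ j : Nat, vrow w j c = x ∧ x ≤ n := by
  unfold fcol at hx
  rw [List.mem_filter, List.mem_map] at hx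
  obtain ⟨⟨j, _, rfl⟩, hle⟩ := hx
  exact ⟨j, rfl, by simpa using hle⟩

lemma row_eq (w : Int) (hw : 0 < w) (x : Int) (j k : Nat)
    (h1 : (j : Int) * w < x) (h2 : x ≤ (j : Int) * w + w)
    (h3 : (k : Int) * w < x) (h4 : x ≤ (k : Int) * w + w) : j = k := by
  rcases lt_trichotomy j k with h | h | h
  · have h5 : ((j : Int) + 1) * w ≤ (k : Int) * w :=
      mul_le_mul_of_nonneg_right (by push_cast; omega) (by omega)
    have h6 : ((j : Int) + 1) * w = (j : Int) * w + w := by ring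
    omega
  · exact h
  · have h5 : ((k : Int) + 1) * w ≤ (j : Int) * w :=
      mul_le_mul_of_nonneg_right (by push_cast; omega) (by omega)
    have h6 : ((k : Int) + 1) * w = (k : Int) * w + w := by ring
    omega

lemma final_out (n w num : Int) (hw : 0 < w) (h : num < 1 ∨ n < num) :
    pvScan num ((List.range w.toNat).map (fcol n w)) = 0 := by
  rw [← List.append_nil ((List.range w.toNat).map (fcol n w)), pvScan_skip]
  · rfl
  · intro l hl hmem
    rw [List.mem_map] at hl
    obtain ⟨c, hcm, rfl⟩ := hl
    rw [List.mem_range] at hcm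
    have hc : (c : Int) < w := by omega
    obtain ⟨j, hv, hle⟩ := mem_fcol n w c num hmem
    have hb := vrow_bounds w hw j c hc
    have hj0 : (0 : Int) ≤ (j : Int) * w := mul_nonneg (Int.natCast_nonneg j) (by omega)
    omega

lemma final_in (n w num : Int) (hw : 0 < w) (h1 : 1 ≤ num) (h2 : num ≤ n) :
    pvScan num ((List.range w.toNat).map (fcol n w)) = solution_alt n w num := by
  have hn1 : 1 ≤ n := le_trans h1 h2
  have hWw : ((w.toNat : Int)) = w := Int.toNat_of_nonneg (by omega)
  -- division facts for num
  have hde : w * ((num - 1) / w) + (num - 1) % w = num - 1 := Int.ediv_add_emod (num - 1) w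
  have hp0 : 0 ≤ (num - 1) % w := Int.emod_nonneg _ (by omega)
  have hpw : (num - 1) % w < w := Int.emod_lt_of_pos _ hw
  have hq0 : 0 ≤ (num - 1) / w := Int.ediv_nonneg (by omega) (by omega)
  set rN : Nat := ((num - 1) / w).toNat with hrdef
  set pN : Nat := ((num - 1) % w).toNat with hpdef
  have hrN : (rN : Int) = (num - 1) / w := Int.toNat_of_nonneg hq0
  have hpN : (pN : Int) = (num - 1) % w := Int.toNat_of_nonneg hp0
  have hcmr : (rN : Int) * w = w * ((num - 1) / w) := by rw [hrN]; ring
  set colN : Nat := if rN % 2 = 0 then pN else w.toNat - 1 - pN with hcoldef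
  have hcolW : colN < w.toNat := by
    have : pN < w.toNat := by omega
    rw [hcoldef]; split <;> omega
  have hcol : (colN : Int) < w := by omega
  have hvnum : vrow w rN colN = num := by
    unfold vrow
    rw [hcoldef]
    by_cases hpar : rN % 2 = 0
    · rw [if_pos hpar, if_pos hpar]
      omega
    · rw [if_neg hpar, if_neg hpar]
      omega
  -- division facts for n
  have hdeN : w * ((n - 1) / w) + (n - 1) % w = n - 1 := Int.ediv_add_emod (n - 1) w
  have hp0N : 0 ≤ (n - 1) % w := Int.emod_nonneg _ (by omega)
  have hpwN : (n - 1) % w < w := Int.emod_lt_of_pos _ hw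
  have hq0N : 0 ≤ (n - 1) / w := Int.ediv_nonneg (by omega) (by omega)
  set RN : Nat := ((n - 1) / w).toNat with hRdef
  have hRN : (RN : Int) = (n - 1) / w := Int.toNat_of_nonneg hq0N
  have hcmR : (RN : Int) * w = w * ((n - 1) / w) := by rw [hRN]; ring
  have hcmR1 : ((RN : Int) + 1) * w = w * ((n - 1) / w) + w := by rw [hRN]; ring
  have hRlow : (RN : Int) * w < n := by omega
  have hRhigh : n ≤ ((RN : Int) + 1) * w := by omega
  have hnumlow : (rN : Int) * w + 1 ≤ num := by omega
  have hnumhigh : num ≤ ((rN : Int) + 1) * w := by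
    have : ((rN : Int) + 1) * w = w * ((num - 1) / w) + w := by rw [hrN]; ring
    omega
  have hrR : rN ≤ RN := by
    have : (num - 1) / w ≤ (n - 1) / w := Int.ediv_le_ediv hw (by omega)
    omega
  -- uniqueness of num's position
  have huniq : ∀ (j c : Nat), (c : Int) < w → vrow w j c = num → j = rN ∧ c = colN := by
    intro j c hc hv
    have hbj := vrow_bounds w hw j c hc
    have hrb : (rN : Int) * w < num ∧ num ≤ (rN : Int) * w + w := by
      have hb2 := vrow_bounds w hw rN colN hcol
      omega
    have hjr : j = rN := row_eq w hw num j rN (by omega) (by omega) (by omega) (by omega)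
    subst hjr
    refine ⟨rfl, ?_⟩
    unfold vrow at hv
    rw [hcoldef]
    by_cases hpar : rN % 2 = 0
    · rw [if_pos hpar] at hv ⊢
      omega
    · rw [if_neg hpar] at hv ⊢
      omega
  -- structure of num's column
  have hfc := fcol_eq n w hw RN colN hcol hRlow hRhigh
  have hnopref : num ∉ (List.range rN).map (fun j => vrow w j colN) := by
    intro hmem
    rw [List.mem_map] at hmem
    obtain ⟨j, hj, hv⟩ := hmem
    rw [List.mem_range] at hj
    have hbj := vrow_bounds w hw j colN hcol
    have h5 : ((j : Int) + 1) * w ≤ (rN : Int) * w :=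
      mul_le_mul_of_nonneg_right (by push_cast; omega) (by omega)
    have h6 : ((j : Int) + 1) * w = (j : Int) * w + w := by ring
    omega
  have hlen : (fcol n w colN).length = RN + (if vrow w RN colN ≤ n then 1 else 0) := by
    rw [hfc]
    unfold pcols
    by_cases hv : vrow w RN colN ≤ n <;> simp [hv]
  have hstruct : ∃ t, fcol n w colN
      = (List.range rN).map (fun j => vrow w j colN) ++ num :: t := by
    by_cases hrlt : rN < RN
    · have hsp : RN = rN + ((RN - rN - 1) + 1) := by omega
      rw [hfc]
      unfold pcols
      rw [hsp, List.range_add, List.map_append, List.range_succ_eq_map, List.map_cons,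
        List.map_cons, Nat.add_zero, hvnum, List.append_assoc, List.cons_append]
      exact ⟨_, rfl⟩
    · have hre : rN = RN := by omega
      rw [hfc, ← hre, hvnum, if_pos h2]
      unfold pcols
      exact ⟨[], rfl⟩
  obtain ⟨tail, hfc2⟩ := hstruct
  have hidx : PySem.List.index? (fcol n w colN) num = some rN := by
    rw [hfc2, index?_append_cons _ _ _ hnopref]
    simp
  have hmemf : num ∈ fcol n w colN := by rw [hfc2]; simp
  -- the scan reaches exactly column colN
  have hWsplit : w.toNat = colN + ((w.toNat - colN - 1) + 1) := by omega
  rw [hWsplit, List.range_add, List.map_append, pvScan_skip _ _ _ ?side]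
  case side =>
    intro l hl hmem
    rw [List.mem_map] at hl
    obtain ⟨c, hcm, rfl⟩ := hl
    rw [List.mem_range] at hcm
    obtain ⟨j, hv, _⟩ := mem_fcol n w c num hmem
    have : j = rN ∧ c = colN := huniq j c (by omega) hv
    omega
  rw [List.range_succ_eq_map, List.map_cons, List.map_cons, Nat.add_zero]
  simp only [pvScan]
  rw [if_pos (List.contains_iff_mem.mpr hmemf), hidx, hlen]
  -- evaluate B
  have hcond : (decide (num < 1) || decide (n < num)) = false := by
    simp only [Bool.or_eq_false_iff, decide_eq_false_iff_not]
    omega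
  simp only [solution_alt, hcond, Bool.false_eq_true, if_false,
    PySem.Int.floordiv_eq_ediv_of_pos hw, PySem.Int.mod_eq_emod_of_pos hw,
    PySem.Int.mod_eq_emod_of_pos (by norm_num : (0:Int) < 2), beq_iff_eq]
  -- identify B's col with colN and B's last row count
  have hparEq : ((num - 1) / w) % 2 = 0 ↔ rN % 2 = 0 := by omega
  have hcolEq : (if ((num - 1) / w) % 2 = 0 then (num - 1) % w else w - 1 - (num - 1) % w)
      = (colN : Int) := by
    rw [hcoldef]
    by_cases hpar : rN % 2 = 0
    · rw [if_pos hpar, if_pos (hparEq.mpr hpar)]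
      omega
    · rw [if_neg hpar, if_neg (fun hx => hpar (hparEq.mp hx))]
      omega
  have hparEqR : ((n - 1) / w) % 2 = 0 ↔ RN % 2 = 0 := by omega
  by_cases hv : vrow w RN colN ≤ n
  · rw [if_pos hv]
    have hBc : (if ((n - 1) / w) % 2 = 0
        then decide ((if ((num - 1) / w) % 2 = 0 then (num - 1) % w else w - 1 - (num - 1) % w) < (n - 1) % w + 1)
        else decide ((if ((num - 1) / w) % 2 = 0 then (num - 1) % w else w - 1 - (num - 1) % w) ≥ w - ((n - 1) % w + 1))) = true := by
      rw [hcolEq]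
      unfold vrow at hv
      by_cases hparR : RN % 2 = 0
      · rw [if_pos (hparEqR.mpr hparR)]
        rw [if_pos hparR] at hv
        simp only [decide_eq_true_eq]
        omega
      · rw [if_neg (fun hx => hparR (hparEqR.mp hx))]
        rw [if_neg hparR] at hv
        simp only [decide_eq_true_eq, ge_iff_le]
        omega
    rw [hBc]
    simp only [if_pos rfl]
    push_cast
    omega
  · rw [if_neg hv]
    have hBc : (if ((n - 1) / w) % 2 = 0
        then decide ((if ((num - 1) / w) % 2 = 0 then (num - 1) % w else w - 1 - (num - 1) % w) < (n - 1) % w + 1)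
        else decide ((if ((num - 1) / w) % 2 = 0 then (num - 1) % w else w - 1 - (num - 1) % w) ≥ w - ((n - 1) % w + 1))) = false := by
      rw [hcolEq]
      unfold vrow at hv
      by_cases hparR : RN % 2 = 0
      · rw [if_pos (hparEqR.mpr hparR)]
        rw [if_pos hparR] at hv
        simp only [decide_eq_false_iff_not]
        omega
      · rw [if_neg (fun hx => hparR (hparEqR.mp hx))]
        rw [if_neg hparR] at hv
        simp only [decide_eq_false_iff_not, ge_iff_le]
        omega
    rw [hBc]
    simp only [Bool.false_eq_true, if_false]
    push_cast
    omega

lemma pvScan_replicate (num : Int) (W : Nat) : pvScan num (List.replicate W []) = 0 := by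
  induction W with
  | zero => rfl
  | succ k ih => simpa [pvScan] using ih

lemma replicate_eq_map_pcols0 (w : Int) (W : Nat) :
    List.replicate W [] = (List.range W).map (pcols w 0) := by
  rw [eq_comm]
  unfold pcols
  simp

lemma alt_zero (n w num : Int) (h : num < 1 ∨ n < num) : solution_alt n w num = 0 := by
  unfold solution_alt
  have hcond : (decide (num < 1) || decide (n < num)) = true := by
    simp only [Bool.or_eq_true, decide_eq_true_eq]
    omega
  rw [hcond]
  simp

-- ===== VERDICT (by name: the statement is the Claim_ definition above) =====
theorem solution_spec : Claim_equal_solution := by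
  unfold Claim_equal_solution
  intro n w num hdom hpre
  unfold Spec_solution
  by_cases hn : n ≤ 0
  · have ht : n.toNat = 0 := by omega
    unfold solution
    rw [ht]
    simp only [pvWhile]
    rw [if_neg (by omega), pvScan_replicate, alt_zero n w num (by omega)]
  · have hw : (1 : Int) ≤ w := by
      rcases hpre with h | h
      · exact h
      · omega
    have hn1 : (1 : Int) ≤ n := by omega
    unfold solution
    have hstart := while_spec n w (by omega) (n.toNat + 1) 0 (by simp; omega) (by omega)
    have e1 : (0 : Int) = ((0 : Nat) : Int) * w := by simp
    have e2 : (1 : Int) = (if 0 % 2 = 0 then (1 : Int) else -1) := by norm_num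
    rw [replicate_eq_map_pcols0 w, e1, e2, hstart]
    by_cases hnum : 1 ≤ num ∧ num ≤ n
    · exact final_in n w num (by omega) hnum.1 hnum.2
    · rw [final_out n w num (by omega) (by omega), alt_zero n w num (by omega)]
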